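-- pv_equiv track=rewrite | github.com/aidrivelab/AiDocStation | AIDocStation-Master/local_bridge/service/spreadsheet/parser.py | _split_table_cells
-- ===== SOURCE A (Python) =====
-- from typing import List, Optional
--
-- def _split_table_cells(line: str) -> List[str]:
--
--
--
--
--
--
--
--
--
--     cells = []
--     current_cell = []
--     i = 0
--
--     while i < len(line):
--         if i > 0 and line[i] == '|' and line[i - 1] == '\\':
--
--             current_cell[-1] = '|'
--             i += 1
--         elif line[i] == '|':
--
--             cells.append(''.join(current_cell).strip())
--             current_cell = []
--             i += 1
--         else:
--             current_cell.append(line[i])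
--             i += 1
--
--
--     if current_cell or cells:
--         cells.append(''.join(current_cell).strip())
--
--     return cells
-- ===== SOURCE B (Python) =====
-- from typing import List
--
-- _SENT = '\x00'
--
-- def _split_table_cells(line: str) -> List[str]:
--     if line == '':
--         return []
--     parts = line.replace('\\|', _SENT).split('|')
--     return [p.replace(_SENT, '|').strip() for p in parts]
-- ===== Notes on version B (the rewrite author's own statement) =====
-- stated objective: simpler
-- what changed: Replaced the index-based char-by-char while loop (with look-back for escaped pipes and manual cell accumulation) by a preprocess-then-split pipeline: neutralise the escape sequence with a sentinel char, split on the pipe separator, then restore and strip each part.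
import Mathlib
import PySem

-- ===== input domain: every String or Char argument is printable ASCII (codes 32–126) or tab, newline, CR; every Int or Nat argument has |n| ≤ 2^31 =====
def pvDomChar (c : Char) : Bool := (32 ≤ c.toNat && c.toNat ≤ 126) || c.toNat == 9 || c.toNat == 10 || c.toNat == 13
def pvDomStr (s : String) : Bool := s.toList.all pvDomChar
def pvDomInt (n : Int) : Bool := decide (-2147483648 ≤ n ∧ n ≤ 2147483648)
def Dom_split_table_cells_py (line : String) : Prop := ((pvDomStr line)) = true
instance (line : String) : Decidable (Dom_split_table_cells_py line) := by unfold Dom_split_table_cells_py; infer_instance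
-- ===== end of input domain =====

-- B replaces A's index-based char loop (look-back for '\|', manual cell accumulation) by a
-- preprocess-then-split pipeline: neutralise '\|' with a sentinel, split on '|', restore and strip.

-- ===== PORT A =====
-- ''.join(current_cell).strip()
def pvStripS (cur : List Char) : String := String.ofList (PySem.Chars.strip cur)

-- the while loop of A: remaining chars, prev = line[i-1] (none at i = 0), current_cell, cells;
-- the final `if current_cell or cells: cells.append(...)` is the base case.
def pvAGo : List Char → Option Char → List Char → List String → List String
  | [], _, cur, cells =>
      if cur ≠ [] ∨ cells ≠ [] then cells ++ [pvStripS cur] else cells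
  | c :: rest, prev, cur, cells =>
      if prev = some '\\' ∧ c = '|' then
        pvAGo rest (some c) (cur.dropLast ++ ['|']) cells
      else if c = '|' then
        pvAGo rest (some c) [] (cells ++ [pvStripS cur])
      else
        pvAGo rest (some c) (cur ++ [c]) cells

def split_table_cells_py (line : String) : List String :=
  pvAGo line.toList none [] []

-- ===== PORT B =====
def split_table_cells_py_alt (line : String) : List String :=
  if line = "" then []
  else
    let tmp := PySem.Str.replace line "\\|" "\x00"
    let parts := PySem.Chars.splitOn tmp.toList ['|']   -- tmp.split('|'), sep nonempty
    parts.map (fun p => String.ofList (PySem.Chars.strip (PySem.Chars.replace p ['\x00'] ['|'])))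

-- ===== PRECONDITION & SPEC =====
def Spec_split_table_cells_py (line : String) (out : List String) : Prop := out = split_table_cells_py_alt line
instance (line : String) (out : List String) : Decidable (Spec_split_table_cells_py line out) := by unfold Spec_split_table_cells_py; infer_instance

-- ===== CLAIM (what is proved, stated in full; the proofs are below) =====
def Claim_equal_split_table_cells_py : Prop := ∀ (line : String), Dom_split_table_cells_py line → Spec_split_table_cells_py line (split_table_cells_py line)

-- ===== LEMMAS AND PROOFS =====

-- prepend a char to the first piece (creating it if none)
def pvConsH (c : Char) : List (List Char) → List (List Char)
  | [] => [[c]]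
  | h :: tl => (c :: h) :: tl

-- prepend a chunk to the first piece
def pvPreH (p : List Char) : List (List Char) → List (List Char)
  | [] => [p]
  | h :: tl => (p ++ h) :: tl

-- the pieces of the line, split at unescaped '|', with '\|' contributing '|'
def pvSp : List Char → List (List Char)
  | [] => [[]]
  | c :: t =>
      if c = '\\' ∧ t.head? = some '|' then pvConsH '|' (pvSp t.tail)
      else if c = '|' then [] :: pvSp t
      else pvConsH c (pvSp t)
  termination_by l => l.length
  decreasing_by all_goals (simp; try omega)

-- clean form of replace "\|" → "\x00"
def pvRepl : List Char → List Char
  | [] => []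
  | c :: t =>
      if c = '\\' ∧ t.head? = some '|' then '\x00' :: pvRepl t.tail
      else c :: pvRepl t
  termination_by l => l.length
  decreasing_by all_goals (simp; try omega)

def pvSubst (c : Char) : Char := if c = '\x00' then '|' else c

-- clean form of split on '|'
def pvSplit : List Char → List (List Char)
  | [] => [[]]
  | c :: t => if c = '|' then [] :: pvSplit t else pvConsH c (pvSplit t)

lemma pvSplit_ne_nil (l : List Char) : pvSplit l ≠ [] := by
  cases l with
  | nil => simp [pvSplit]
  | cons c t =>
      simp only [pvSplit]
      split
      · simp
      · cases h : pvSplit t <;> simp [pvConsH]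

lemma pvSp_ne_nil (l : List Char) : pvSp l ≠ [] := by
  cases l with
  | nil => simp [pvSp]
  | cons c t =>
      rw [pvSp]
      split
      · cases h : pvSp t.tail <;> simp [pvConsH]
      · split
        · simp
        · cases h : pvSp t <;> simp [pvConsH]

lemma pvPreH_nil (L : List (List Char)) (h : L ≠ []) : pvPreH [] L = L := by
  cases L with
  | nil => exact absurd rfl h
  | cons a b => simp [pvPreH]

lemma pvPreH_consH (p : List Char) (c : Char) (L : List (List Char)) :
    pvPreH p (pvConsH c L) = pvPreH (p ++ [c]) L := by
  cases L <;> simp [pvPreH, pvConsH]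

lemma map_map_consH (f : Char → Char) (c : Char) (L : List (List Char)) :
    List.map (List.map f) (pvConsH c L) = pvConsH (f c) (List.map (List.map f) L) := by
  cases L <;> simp [pvConsH]

-- replace.go with pattern "\|" computes pvRepl
lemma replace_go_repl (fuel : Nat) :
    ∀ (l acc : List Char), l.length ≤ fuel →
      PySem.Chars.replace.go ['\\', '|'] ['\x00'] fuel l acc = acc.reverse ++ pvRepl l := by
  induction fuel with
  | zero =>
      intro l acc h
      have : l = [] := by cases l <;> simp_all
      subst this
      simp [PySem.Chars.replace.go, pvRepl]
  | succ n ih =>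
      intro l acc h
      cases l with
      | nil => simp [PySem.Chars.replace.go, pvRepl]
      | cons c t =>
          rw [PySem.Chars.replace.go]
          by_cases hp : c = '\\' ∧ t.head? = some '|'
          · obtain ⟨hc, ht⟩ := hp
            cases t with
            | nil => simp at ht
            | cons c2 t2 =>
                simp only [Option.some.injEq, List.head?_cons] at ht
                subst hc ht
                have hpre : List.isPrefixOf ['\\', '|'] ('\\' :: '|' :: t2) = true := by
                  simp [List.isPrefixOf]
                rw [if_pos hpre]
                have hlen : t2.length ≤ n := by simp at h; omega
                simp only [List.length_cons, List.length_nil, List.drop_succ_cons, List.drop_zero]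
                rw [ih _ _ hlen]
                rw [pvRepl]
                rw [if_pos ⟨rfl, rfl⟩]
                simp
          · have hpre : List.isPrefixOf ['\\', '|'] (c :: t) = false := by
              cases t with
              | nil => simp [List.isPrefixOf]
              | cons c2 t2 =>
                  have hcc : ¬(c = '\\' ∧ c2 = '|') := fun hx => hp ⟨hx.1, by simp [hx.2]⟩
                  simp [List.isPrefixOf]
                  tauto
            rw [if_neg (by simp [hpre])]
            have hlen : t.length ≤ n := by simp at h; omega
            rw [ih _ _ hlen]
            rw [pvRepl]
            rw [if_neg hp]
            simp
-- replace.go with single-char pattern is a map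
lemma replace_go_subst (fuel : Nat) :
    ∀ (l acc : List Char), l.length ≤ fuel →
      PySem.Chars.replace.go ['\x00'] ['|'] fuel l acc = acc.reverse ++ l.map pvSubst := by
  induction fuel with
  | zero =>
      intro l acc h
      have : l = [] := by cases l <;> simp_all
      subst this
      simp [PySem.Chars.replace.go]
  | succ n ih =>
      intro l acc h
      cases l with
      | nil => simp [PySem.Chars.replace.go]
      | cons c t =>
          rw [PySem.Chars.replace.go]
          have hlen : t.length ≤ n := by simp at h; omega
          by_cases hc : c = '\x00'
          · subst hc
            have hpre : List.isPrefixOf ['\x00'] ('\x00' :: t) = true := by simp [List.isPrefixOf]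
            rw [if_pos hpre]
            simp only [List.length_cons, List.length_nil, List.drop_succ_cons, List.drop_zero]
            rw [ih _ _ hlen]
            simp [pvSubst]
          · have hpre : List.isPrefixOf ['\x00'] (c :: t) = false := by
              simp [List.isPrefixOf]; tauto
            rw [if_neg (by simp [hpre])]
            rw [ih _ _ hlen]
            simp [pvSubst, hc]

-- splitOn.go with sep "|" computes pvSplit
lemma splitOn_go_split (fuel : Nat) :
    ∀ (l cur : List Char) (acc : List (List Char)), l.length ≤ fuel →
      PySem.Chars.splitOn.go ['|'] fuel l cur acc =
        acc.reverse ++ pvPreH cur.reverse (pvSplit l) := by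
  induction fuel with
  | zero =>
      intro l cur acc h
      have : l = [] := by cases l <;> simp_all
      subst this
      simp [PySem.Chars.splitOn.go, pvSplit, pvPreH]
  | succ n ih =>
      intro l cur acc h
      cases l with
      | nil => simp [PySem.Chars.splitOn.go, pvSplit, pvPreH]
      | cons c t =>
          rw [PySem.Chars.splitOn.go]
          have hlen : t.length ≤ n := by simp at h; omega
          by_cases hc : c = '|'
          · subst hc
            have hpre : List.isPrefixOf ['|'] ('|' :: t) = true := by simp [List.isPrefixOf]
            rw [if_pos hpre]
            simp only [List.length_cons, List.length_nil, List.drop_succ_cons, List.drop_zero]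
            rw [ih _ _ _ hlen]
            rw [pvSplit, if_pos rfl]
            simp only [List.reverse_nil]
            rw [pvPreH_nil _ (pvSplit_ne_nil t)]
            simp [pvPreH]
          · have hpre : List.isPrefixOf ['|'] (c :: t) = false := by
              simp [List.isPrefixOf]; tauto
            rw [if_neg (by simp [hpre])]
            rw [ih _ _ _ hlen]
            rw [pvSplit, if_neg hc, pvPreH_consH]
            simp

-- the split pipeline computes pvSp (sentinel-free input)
lemma pipeline_eq_sp (n : Nat) :
    ∀ (cs : List Char), cs.length ≤ n → '\x00' ∉ cs →
      List.map (List.map pvSubst) (pvSplit (pvRepl cs)) = pvSp cs := by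
  induction n with
  | zero =>
      intro cs h _
      have : cs = [] := by cases cs <;> simp_all
      subst this
      simp [pvRepl, pvSplit, pvSp]
  | succ n ih =>
      intro cs h hfree
      cases cs with
      | nil => simp [pvRepl, pvSplit, pvSp]
      | cons c t =>
          rw [pvRepl, pvSp]
          by_cases hp : c = '\\' ∧ t.head? = some '|'
          · rw [if_pos hp, if_pos hp]
            rw [pvSplit, if_neg (by decide)]
            have hlen : t.tail.length ≤ n := by
              cases t <;> simp_all <;> omega
            have hfree' : '\x00' ∉ t.tail := by
              intro hm; exact hfree (List.mem_cons_of_mem _ (List.mem_of_mem_tail hm))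
            rw [map_map_consH, ih _ hlen hfree']
            simp [pvSubst]
          · rw [if_neg hp, if_neg hp]
            have hlen : t.length ≤ n := by simp at h; omega
            have hfree' : '\x00' ∉ t := fun hm => hfree (List.mem_cons_of_mem _ hm)
            have hc0 : c ≠ '\x00' := fun hc => hfree (List.mem_cons.mpr (Or.inl hc.symm))
            by_cases hc : c = '|'
            · subst hc
              rw [if_pos rfl]
              rw [pvSplit, if_pos rfl]
              simp only [List.map_cons, List.map_nil]
              rw [ih _ hlen hfree']
            · rw [if_neg hc]
              rw [pvSplit, if_neg hc]
              rw [map_map_consH, ih _ hlen hfree']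
              simp [pvSubst, hc0]

-- the tail of A's loop result: cells so far ++ the cells from the remaining pieces
def pvAsm (cells : List String) (L : List (List Char)) : List String :=
  let last := L.getLastD []
  let cells' := cells ++ (L.dropLast).map pvStripS
  if last ≠ [] ∨ cells' ≠ [] then cells' ++ [pvStripS last] else cells'

lemma pvAsm_cons (cells : List String) (x : List Char) (L : List (List Char)) (h : L ≠ []) :
    pvAsm cells (x :: L) = pvAsm (cells ++ [pvStripS x]) L := by
  cases L with
  | nil => exact absurd rfl h
  | cons a b => simp [pvAsm]

-- A's loop computes pvAsm of the pieces
lemma aGo_eq_asm (n : Nat) :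
    ∀ (cs : List Char) (prev : Option Char) (cur : List Char) (cells : List String),
      cs.length ≤ n → (prev = some '\\' → cs.head? ≠ some '|') →
      pvAGo cs prev cur cells = pvAsm cells (pvPreH cur (pvSp cs)) := by
  induction n with
  | zero =>
      intro cs prev cur cells h _
      have : cs = [] := by cases cs <;> simp_all
      subst this
      simp [pvAGo, pvSp, pvPreH, pvAsm]
  | succ n ih =>
      intro cs prev cur cells h hprev
      cases cs with
      | nil => simp [pvAGo, pvSp, pvPreH, pvAsm]
      | cons c t =>
          rw [pvAGo, pvSp]
          by_cases hp : c = '\\' ∧ t.head? = some '|'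
          · obtain ⟨hc, ht⟩ := hp
            subst hc
            cases t with
            | nil => simp at ht
            | cons c2 t2 =>
                simp only [List.head?_cons, Option.some.injEq] at ht
                subst ht
                -- first step: '\\' appended
                rw [if_neg (by simp), if_neg (by decide)]
                -- second step: escaped pipe
                rw [pvAGo, if_pos ⟨rfl, rfl⟩]
                have hlen : t2.length ≤ n := by simp at h; omega
                rw [ih _ _ _ _ hlen (by simp)]
                have hdl : (cur ++ ['\\']).dropLast ++ ['|'] = cur ++ ['|'] := by simp
                rw [hdl]
                rw [if_pos ⟨rfl, rfl⟩, List.tail_cons, pvPreH_consH]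
          · rw [if_neg hp]
            have hlen : t.length ≤ n := by simp at h; omega
            by_cases hc : c = '|'
            · subst hc
              have : prev ≠ some '\\' := by
                intro hpr
                exact hprev hpr (by simp)
              rw [if_neg (by intro hx; exact this hx.1), if_pos rfl, if_pos rfl]
              rw [ih _ _ _ _ hlen (by simp)]
              rw [pvPreH_nil _ (pvSp_ne_nil t)]
              simp only [pvPreH, List.append_nil]
              rw [pvAsm_cons cells cur (pvSp t) (pvSp_ne_nil t)]
            · rw [if_neg (by intro hx; exact hc hx.2), if_neg hc, if_neg hc]
              have hnext : some c = some '\\' → t.head? ≠ some '|' := by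
                intro hcc hh
                simp only [Option.some.injEq] at hcc
                exact hp ⟨hcc, hh⟩
              rw [ih _ _ _ _ hlen hnext, pvPreH_consH]

lemma pvSp_ne_trivial (cs : List Char) (h : cs ≠ []) : pvSp cs ≠ [[]] := by
  cases cs with
  | nil => exact absurd rfl h
  | cons c t =>
      rw [pvSp]
      split
      · cases hs : pvSp t.tail <;> simp [pvConsH]
      · split
        · have := pvSp_ne_nil t
          intro hx
          simp only [List.cons.injEq] at hx
          exact this hx.2
        · cases hs : pvSp t <;> simp [pvConsH]

lemma pvAsm_nil_eq (L : List (List Char)) (h : L ≠ []) (h2 : L ≠ [[]]) :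
    pvAsm [] L = L.map pvStripS := by
  cases L with
  | nil => exact absurd rfl h
  | cons a b =>
      cases b with
      | nil =>
          have ha : a ≠ [] := by intro hx; exact h2 (by rw [hx])
          simp [pvAsm, ha]
      | cons a2 b2 =>
          rw [pvAsm]
          simp only [List.dropLast_cons₂, List.map_cons, List.nil_append]
          rw [if_pos (by right; simp)]
          have hb : (a2 :: b2 : List (List Char)) ≠ [] := by simp
          have : (a2 :: b2).dropLast ++ [(a2 :: b2).getLastD []] = a2 :: b2 := by
            rw [List.getLastD_eq_getLast?, List.getLast?_eq_some_getLast hb, Option.getD_some]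
            exact List.dropLast_append_getLast hb
          calc pvStripS a :: ((a2 :: b2).dropLast.map pvStripS ++ [pvStripS ((a :: a2 :: b2).getLastD [])])
              = pvStripS a :: (((a2 :: b2).dropLast ++ [(a2 :: b2).getLastD []]).map pvStripS) := by
                simp [List.map_append]
            _ = _ := by rw [this]; simp

-- ===== VERDICT (by name: the statement is the Claim_ definition above) =====
theorem split_table_cells_py_spec : Claim_equal_split_table_cells_py := by
  intro line hdom
  unfold Spec_split_table_cells_py
  by_cases hnil : line = ""
  · subst hnil
    simp [split_table_cells_py, split_table_cells_py_alt, pvAGo]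
  · have hcs : line.toList ≠ [] := fun h => hnil (String.toList_eq_nil_iff.mp h)
    have hfree : '\x00' ∉ line.toList := by
      intro hm
      have := List.all_eq_true.mp hdom _ hm
      simp [pvDomChar] at this
    -- A side
    have hA : split_table_cells_py line = (pvSp line.toList).map pvStripS := by
      unfold split_table_cells_py
      rw [aGo_eq_asm line.toList.length _ _ _ _ (le_refl _) (by simp)]
      rw [pvPreH_nil _ (pvSp_ne_nil _)]
      exact pvAsm_nil_eq _ (pvSp_ne_nil _) (pvSp_ne_trivial _ hcs)
    -- B side
    have hB : split_table_cells_py_alt line = (pvSp line.toList).map pvStripS := by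
      unfold split_table_cells_py_alt
      rw [if_neg hnil]
      show (PySem.Chars.splitOn (PySem.Str.replace line "\\|" "\x00").toList ['|']).map
          (fun p => String.ofList (PySem.Chars.strip (PySem.Chars.replace p ['\x00'] ['|'])))
          = (pvSp line.toList).map pvStripS
      have hrepl : (PySem.Str.replace line "\\|" "\x00").toList = pvRepl line.toList := by
        show (String.ofList (PySem.Chars.replace line.toList "\\|".toList "\x00".toList)).toList = _
        rw [String.toList_ofList]
        show PySem.Chars.replace line.toList ['\\', '|'] ['\x00'] = _
        rw [PySem.Chars.replace]
        rw [if_neg (by decide)]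
        exact replace_go_repl _ _ _ (le_refl _)
      rw [hrepl]
      rw [PySem.Chars.splitOn]
      rw [splitOn_go_split _ _ _ _ (by omega)]
      simp only [List.reverse_nil, List.nil_append]
      rw [pvPreH_nil _ (pvSplit_ne_nil _)]
      have heach : ∀ p : List Char, PySem.Chars.replace p ['\x00'] ['|'] = p.map pvSubst := by
        intro p
        rw [PySem.Chars.replace, if_neg (by decide)]
        exact replace_go_subst _ _ _ (le_refl _)
      have : (pvSplit (pvRepl line.toList)).map
          (fun p => String.ofList (PySem.Chars.strip (PySem.Chars.replace p ['\x00'] ['|'])))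
          = ((pvSplit (pvRepl line.toList)).map (List.map pvSubst)).map pvStripS := by
        simp [heach, pvStripS]
      rw [this, pipeline_eq_sp line.toList.length _ (le_refl _) hfree]
    rw [hA, hB]
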